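-- pv_equiv track=rewrite | github.com/KittenHero/adventofcodesolutions | 2023/p14.py | tilt_w
-- ===== SOURCE A (Python) =====
-- def tilt_w(grid):
--   for row in grid:
--     floor = 0
--     for j, elem in enumerate(row):
--       if elem == 'O' and floor < j:
--         row[j] = '.'
--         row[floor] = 'O'
--         floor += 1
--       elif elem == 'O' and floor == j or elem == '#':
--         floor = j + 1
--   return grid
-- ===== SOURCE B (Python) =====
-- def tilt_w(grid):
--   # Per-row segment pass: count 'O's per '#'-free segment, then rewrite the
--   # segment in place via one slice assignment (same rows mutated, same return).
--   for row in grid: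
--     n = len(row)
--     lo = 0
--     while lo < n:
--       if row[lo] == '#':
--         lo += 1
--       else:
--         hi = lo
--         while hi < n and row[hi] != '#':
--           hi += 1
--         seg = row[lo:hi]
--         k = seg.count('O')
--         row[lo:hi] = ['O'] * k + [('.' if c == 'O' else c) for c in seg[k:]]
--         lo = hi
--   return grid
-- ===== Notes on version B (the rewrite author's own statement) =====
-- stated objective: alternative
-- what changed: Replaces A's running-floor swap loop (per-cell conditional swaps against a floor pointer) with a per-segment pass: split each row at '#', count the 'O's in each segment, and rewrite the segment in one slice assignment ('O'*k then the remaining original chars with 'O' mapped to '.'); both mutate the rows in place and return the same grid object.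
import Mathlib
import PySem

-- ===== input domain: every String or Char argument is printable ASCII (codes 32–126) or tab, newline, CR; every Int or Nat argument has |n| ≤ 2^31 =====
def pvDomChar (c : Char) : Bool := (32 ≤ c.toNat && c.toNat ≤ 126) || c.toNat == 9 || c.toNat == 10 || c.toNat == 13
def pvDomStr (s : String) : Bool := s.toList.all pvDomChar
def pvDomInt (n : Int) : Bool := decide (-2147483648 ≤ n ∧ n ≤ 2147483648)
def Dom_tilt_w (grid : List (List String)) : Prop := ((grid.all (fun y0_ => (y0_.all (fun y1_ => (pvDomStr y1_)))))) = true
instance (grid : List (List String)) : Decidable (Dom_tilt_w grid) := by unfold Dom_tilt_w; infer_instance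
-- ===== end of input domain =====

-- B replaces A's running-floor swap loop by a count-per-'#'-segment then rewrite pass
-- (objective: alternative decomposition, same cost). Both Pythons mutate the grid's
-- rows in place and return the same grid object; the ports model the returned value.

-- ===== PORT A =====
-- One loop step of A's inner 'for j, elem in enumerate(row)' loop: state (row, floor).
-- (Python iterates the live list, but A only ever writes at indices ≤ the current j,
-- so the element read at each j is the original one; the fold over enumerate is exact.)
def pvStepA (st : List String × Int) (p : Int × String) : List String × Int :=
  if p.2 = "O" ∧ st.2 < p.1 then
    (PySem.List.pySetD (PySem.List.pySetD st.1 p.1 ".") st.2 "O", st.2 + 1)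
  else if (p.2 = "O" ∧ st.2 = p.1) ∨ p.2 = "#" then (st.1, p.1 + 1)
  else (st.1, st.2)

def tilt_w (grid : List (List String)) : List (List String) :=
  grid.map (fun row => ((PySem.List.enumerate row).foldl pvStepA (row, 0)).1)

-- ===== PORT B =====
-- '.' if c == 'O' else c
def pvDot (c : String) : String := if c = "O" then "." else c

-- ['O'] * k + [('.' if c == 'O' else c) for c in seg[k:]]  with  k = seg.count('O')
def pvFillSeg (seg : List String) : List String :=
  List.replicate (PySem.List.count seg "O") "O" ++
    (seg.drop (PySem.List.count seg "O")).map pvDot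

-- B's while-loop over one row: skip '#' cells, otherwise scan the maximal '#'-free
-- segment (takeWhile = the inner 'while hi' scan), rewrite it, continue after it.
def pvTiltRow : List String → List String
  | [] => []
  | c :: rest =>
    if h : c = "#" then "#" :: pvTiltRow rest
    else
      pvFillSeg ((c :: rest).takeWhile (fun x => x != "#")) ++
        pvTiltRow ((c :: rest).dropWhile (fun x => x != "#"))
termination_by row => row.length
decreasing_by
  · simp
  · have hd : (c :: rest).dropWhile (fun x => x != "#") = rest.dropWhile (fun x => x != "#") := by
      simp [List.dropWhile_cons, h]
    rw [hd]
    have := List.length_dropWhile_le (p := fun x => x != "#") (l := rest)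
    simp only [List.length_cons]
    omega

def tilt_w_alt (grid : List (List String)) : List (List String) :=
  grid.map pvTiltRow

-- ===== PRECONDITION & SPEC =====
def Spec_tilt_w (grid : List (List String)) (out : List (List String)) : Prop := out = tilt_w_alt grid
instance (grid : List (List String)) (out : List (List String)) : Decidable (Spec_tilt_w grid out) := by unfold Spec_tilt_w; infer_instance

-- ===== CLAIM (what is proved, stated in full; the proofs are below) =====
def Claim_equal_tilt_w : Prop := ∀ (grid : List (List String)), Dom_tilt_w grid → Spec_tilt_w grid (tilt_w grid)

-- ===== LEMMAS AND PROOFS =====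

lemma pv_set_append_len {α : Type} (xs ys : List α) (v : α) :
    (xs ++ ys).set xs.length v = xs ++ ys.set 0 v := by
  induction xs with
  | nil => rfl
  | cons a t ih => simp [List.cons_append, ih]

lemma pv_takeWhile_append (mid l : List String) (h : ∀ c ∈ mid, c ≠ "#") :
    (mid ++ l).takeWhile (fun x => x != "#") = mid ++ l.takeWhile (fun x => x != "#") := by
  induction mid with
  | nil => rfl
  | cons a t ih =>
    have ha : a ≠ "#" := h a (by simp)
    simp only [List.cons_append, List.takeWhile_cons]
    simp [ha, ih (fun c hc => h c (by simp [hc]))]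

lemma pv_dropWhile_append (mid l : List String) (h : ∀ c ∈ mid, c ≠ "#") :
    (mid ++ l).dropWhile (fun x => x != "#") = l.dropWhile (fun x => x != "#") := by
  induction mid with
  | nil => rfl
  | cons a t ih =>
    have ha : a ≠ "#" := h a (by simp)
    simp only [List.cons_append, List.dropWhile_cons]
    simp [ha, ih (fun c hc => h c (by simp [hc]))]

lemma pv_count_zero (l : List String) (h : ∀ c ∈ l, c ≠ "O") :
    PySem.List.count l "O" = 0 := by
  rw [PySem.List.count_eq]
  exact List.count_eq_zero.mpr (fun hm => h "O" hm rfl)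

lemma pv_fill_id (l : List String) (h : ∀ c ∈ l, c ≠ "O") : pvFillSeg l = l := by
  unfold pvFillSeg
  rw [pv_count_zero l h]
  simp only [List.replicate_zero, List.nil_append, List.drop_zero]
  conv_rhs => rw [← List.map_id l]
  exact List.map_congr_left (fun c hc => by simp [pvDot, h c hc])

-- pvTiltRow satisfies its own unfolding equation on EVERY list (including [] and '#'-head,
-- where both sides collapse).
lemma pv_tilt_eq (l : List String) :
    pvTiltRow l = pvFillSeg (l.takeWhile (fun x => x != "#")) ++
      pvTiltRow (l.dropWhile (fun x => x != "#")) := by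
  match l with
  | [] => simp [pvTiltRow, pvFillSeg, PySem.List.count_eq]
  | c :: rest =>
    by_cases h : c = "#"
    · subst h
      simp [pvTiltRow, List.takeWhile_cons, List.dropWhile_cons, pvFillSeg, PySem.List.count_eq]
    · rw [pvTiltRow]
      simp [h]

lemma pv_tilt_id (l : List String) (h : ∀ c ∈ l, c ≠ "O" ∧ c ≠ "#") : pvTiltRow l = l := by
  have ht : l.takeWhile (fun x => x != "#") = l ++ ([] : List String).takeWhile (fun x => x != "#") := by
    simpa using pv_takeWhile_append l [] (fun c hc => (h c hc).2)
  have hd : l.dropWhile (fun x => x != "#") = ([] : List String).dropWhile (fun x => x != "#") := by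
    simpa using pv_dropWhile_append l [] (fun c hc => (h c hc).2)
  rw [pv_tilt_eq l, ht, hd]
  simp [pvTiltRow, pv_fill_id l (fun c hc => (h c hc).1)]

lemma pv_fill_O_cons (seg : List String) :
    pvFillSeg ("O" :: seg) = "O" :: pvFillSeg seg := by
  unfold pvFillSeg
  simp [PySem.List.count_eq, List.count_cons, List.replicate_succ]

lemma pv_tilt_O_nil (rest : List String) : pvTiltRow ("O" :: rest) = "O" :: pvTiltRow rest := by
  rw [pv_tilt_eq ("O" :: rest), pv_tilt_eq rest]
  have : ("O" : String) ≠ "#" := by decide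
  simp only [List.takeWhile_cons, List.dropWhile_cons]
  simp [this, pv_fill_O_cons]

lemma pv_fill_O (m0 : String) (mtl seg : List String)
    (h : ∀ c ∈ m0 :: mtl, c ≠ "O") :
    pvFillSeg (m0 :: mtl ++ "O" :: seg) = "O" :: pvFillSeg (mtl ++ "." :: seg) := by
  have hm0 : m0 ≠ "O" := h m0 (by simp)
  have hmtl : List.count "O" mtl = 0 :=
    List.count_eq_zero.mpr (fun hm => h "O" (by simp [hm]) rfl)
  have hcL : PySem.List.count (m0 :: mtl ++ "O" :: seg) "O" = List.count "O" seg + 1 := by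
    rw [PySem.List.count_eq]
    simp [List.count_cons, List.count_append, hm0, hmtl]
  have hcR : PySem.List.count (mtl ++ "." :: seg) "O" = List.count "O" seg := by
    rw [PySem.List.count_eq]
    simp [List.count_cons, List.count_append, hmtl]
  unfold pvFillSeg
  rw [hcL, hcR, List.replicate_succ]
  simp only [List.cons_append, List.drop_succ_cons, List.append_assoc]
  congr 2
  rw [List.map_drop, List.map_drop]
  congr 1
  simp [pvDot, List.map_append]

lemma pv_tilt_O (m0 : String) (mtl rest : List String)
    (h : ∀ c ∈ m0 :: mtl, c ≠ "O" ∧ c ≠ "#") :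
    pvTiltRow (m0 :: mtl ++ "O" :: rest) = "O" :: pvTiltRow (mtl ++ "." :: rest) := by
  have hO : ("O" : String) ≠ "#" := by decide
  have hdot : ("." : String) ≠ "#" := by decide
  have hm : ∀ c ∈ m0 :: mtl, c ≠ "#" := fun c hc => (h c hc).2
  have hmt : ∀ c ∈ mtl, c ≠ "#" := fun c hc => hm c (by simp [hc])
  rw [pv_tilt_eq (m0 :: mtl ++ "O" :: rest), pv_tilt_eq (mtl ++ "." :: rest)]
  rw [show m0 :: mtl ++ "O" :: rest = (m0 :: mtl) ++ ("O" :: rest) by simp,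
      pv_takeWhile_append _ _ hm, pv_dropWhile_append _ _ hm,
      show mtl ++ "." :: rest = mtl ++ ("." :: rest) by simp,
      pv_takeWhile_append _ _ hmt, pv_dropWhile_append _ _ hmt]
  simp only [List.takeWhile_cons, List.dropWhile_cons]
  simp only [hO, hdot, bne_iff_ne, ne_eq, not_false_eq_true, if_true, decide_true]
  rw [show (m0 :: mtl) ++ "O" :: List.takeWhile (fun x => x != "#") rest
        = m0 :: mtl ++ "O" :: List.takeWhile (fun x => x != "#") rest by simp]
  rw [pv_fill_O m0 mtl _ (fun c hc => (h c hc).1)]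
  simp

lemma pv_tilt_hash (mid rest : List String)
    (h : ∀ c ∈ mid, c ≠ "O" ∧ c ≠ "#") :
    pvTiltRow (mid ++ "#" :: rest) = mid ++ "#" :: pvTiltRow rest := by
  have hm : ∀ c ∈ mid, c ≠ "#" := fun c hc => (h c hc).2
  rw [pv_tilt_eq (mid ++ "#" :: rest), pv_takeWhile_append _ _ hm, pv_dropWhile_append _ _ hm]
  simp only [List.takeWhile_cons, List.dropWhile_cons]
  simp only [bne_self_eq_false, if_false, ite_false]
  norm_num
  rw [pv_fill_id mid (fun c hc => (h c hc).1)]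
  rw [show pvTiltRow ("#" :: rest) = "#" :: pvTiltRow rest from by rw [pvTiltRow]; simp]

-- Loop invariant for A's inner fold: having processed 'done ++ mid' (the cells below
-- floor are final = 'done'; 'mid' are the processed cells between floor and j, which
-- contain no 'O' and no '#'), the fold over the remaining suffix produces
-- 'done ++ pvTiltRow (mid ++ suffix)'.
lemma pv_foldA (suffix : List String) : ∀ (done mid : List String),
    (∀ c ∈ mid, c ≠ "O" ∧ c ≠ "#") →
    ((PySem.List.enumerate suffix ((done.length + mid.length : Nat) : Int)).foldl pvStepA
        (done ++ (mid ++ suffix), (done.length : Int))).1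
      = done ++ pvTiltRow (mid ++ suffix) := by
  induction suffix with
  | nil =>
    intro done mid h
    simp [PySem.List.enumerate, pv_tilt_id mid h]
  | cons c rest ih =>
    intro done mid h
    rw [PySem.List.enumerate_cons, List.foldl_cons]
    by_cases hO : c = "O"
    · subst hO
      rcases mid with _ | ⟨m0, mtl⟩
      · -- floor == j: A leaves the 'O' and advances floor
        have hstep : pvStepA (done ++ ([] ++ "O" :: rest), (done.length : Int))
            (((done.length + ([] : List String).length : Nat) : Int), "O")
            = (done ++ ("O" :: rest), (done.length : Int) + 1) := by
          simp [pvStepA]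
        rw [hstep]
        have := ih (done ++ ["O"]) [] (by simp)
        simp only [List.length_append, List.length_cons, List.length_nil, List.nil_append,
          List.append_assoc, List.cons_append] at this ⊢
        rw [show ((done.length : Int) + 1) = ((done.length + 1 + 0 : Nat) : Int) by push_cast; ring,
            show ((done.length + 0 : Nat) : Int) + 1 = ((done.length + 1 + 0 : Nat) : Int) by push_cast; ring] at *
        rw [this, pv_tilt_O_nil]
      · -- floor < j: A swaps the 'O' down to floor
        have hlt : (done.length : Int) < ((done.length + (m0 :: mtl).length : Nat) : Int) := by
          push_cast; simp
        have hset : PySem.List.pySetD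
              (PySem.List.pySetD (done ++ ((m0 :: mtl) ++ "O" :: rest))
                (((done.length + (m0 :: mtl).length : Nat) : Int)) ".")
              ((done.length : Int)) "O"
            = (done ++ ["O"]) ++ ((mtl ++ ["."]) ++ rest) := by
          rw [PySem.List.pySetD_natCast, PySem.List.pySetD_natCast]
          rw [show done ++ ((m0 :: mtl) ++ "O" :: rest) = (done ++ (m0 :: mtl)) ++ "O" :: rest by simp,
              show done.length + (m0 :: mtl).length = (done ++ (m0 :: mtl)).length by simp,
              pv_set_append_len]
          simp only [List.set_cons_zero]
          rw [show (done ++ (m0 :: mtl)) ++ "." :: rest = done ++ ((m0 :: mtl) ++ "." :: rest) by simp,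
              pv_set_append_len]
          simp
        have hstep : pvStepA (done ++ ((m0 :: mtl) ++ "O" :: rest), (done.length : Int))
            (((done.length + (m0 :: mtl).length : Nat) : Int), "O")
            = ((done ++ ["O"]) ++ ((mtl ++ ["."]) ++ rest), (done.length : Int) + 1) := by
          rw [pvStepA, if_pos ⟨rfl, hlt⟩, hset]
        rw [hstep]
        have hmid' : ∀ c ∈ mtl ++ ["."], c ≠ "O" ∧ c ≠ "#" := by
          intro x hx
          rcases List.mem_append.mp hx with hx | hx
          · exact h x (by simp [hx])
          · simp only [List.mem_singleton] at hx; subst hx; exact ⟨by decide, by decide⟩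
        have := ih (done ++ ["O"]) (mtl ++ ["."]) hmid'
        rw [show (((done.length + (m0 :: mtl).length : Nat) : Int) + 1)
              = (((done ++ ["O"]).length + (mtl ++ ["."]).length : Nat) : Int) by push_cast; simp; ring,
            show ((done.length : Int) + 1) = (((done ++ ["O"]).length : Nat) : Int) by push_cast; simp]
        rw [this]
        rw [pv_tilt_O m0 mtl rest h]
        simp
    · by_cases hH : c = "#"
      · subst hH
        have hstep : pvStepA (done ++ (mid ++ "#" :: rest), (done.length : Int))
            (((done.length + mid.length : Nat) : Int), "#")
            = (done ++ (mid ++ "#" :: rest), ((done.length + mid.length : Nat) : Int) + 1) := by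
          rw [pvStepA, if_neg (by simp), if_pos (Or.inr rfl)]
        rw [hstep]
        have hrec := ih ((done ++ mid) ++ ["#"]) [] (by simp)
        simp only [List.length_nil, Nat.add_zero, List.nil_append] at hrec
        have e3 : ((done.length + mid.length : Nat) : Int) + 1
            = ((((done ++ mid) ++ ["#"]).length : Nat) : Int) := by push_cast; simp; ring
        have e2 : done ++ (mid ++ "#" :: rest) = ((done ++ mid) ++ ["#"]) ++ rest := by simp
        rw [e3, e2, hrec, pv_tilt_hash mid rest h]
        simp
      · -- any other cell: A's loop keeps both row and floor
        have hstep : pvStepA (done ++ (mid ++ c :: rest), (done.length : Int))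
            (((done.length + mid.length : Nat) : Int), c)
            = (done ++ (mid ++ c :: rest), (done.length : Int)) := by
          rw [pvStepA, if_neg (by simp [hO]), if_neg (by simp [hO, hH])]
        rw [hstep]
        have hmid' : ∀ x ∈ mid ++ [c], x ≠ "O" ∧ x ≠ "#" := by
          intro x hx
          rcases List.mem_append.mp hx with hx | hx
          · exact h x hx
          · simp only [List.mem_singleton] at hx; subst hx; exact ⟨hO, hH⟩
        have := ih done (mid ++ [c]) hmid'
        rw [show (((done.length + mid.length : Nat) : Int) + 1)
              = ((done.length + (mid ++ [c]).length : Nat) : Int) by push_cast; simp; ring,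
            show done ++ (mid ++ c :: rest) = done ++ ((mid ++ [c]) ++ rest) by simp]
        rw [this]
        simp

-- ===== VERDICT (by name: the statement is the Claim_ definition above) =====
theorem tilt_w_spec : Claim_equal_tilt_w := by
  intro grid _
  unfold Spec_tilt_w tilt_w tilt_w_alt
  apply List.map_congr_left
  intro row _
  have := pv_foldA row [] [] (by simp)
  simpa using this
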